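-- pv_equiv track=rewrite | github.com/raghav-1998/Problem-of-the-day-GFG | Total Traversal Time/Total-Traversal-Time.py | totalTime
-- ===== SOURCE A (Python) =====
-- from typing import List
--
-- def totalTime(n : int, arr : List[int], time : List[int]) -> int:
--     # code here
--     s=set()
--     ans=0
--
--     s.add(arr[0])
--     for i in range(1,n):
--         if arr[i] in s:
--             ans+=time[arr[i]-1]
--         else:
--             ans+=1
--         s.add(arr[i])
--
--     return ans
-- ===== SOURCE B (Python) =====
-- from typing import List
--
-- def totalTime(n: int, arr: List[int], time: List[int]) -> int:
--     # Count-then-aggregate: order-independent frequency table instead of A's seen-set scan.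
--     if n <= 0:
--         return 0
--     counts = {}
--     for v in arr[:n]:
--         counts[v] = counts.get(v, 0) + 1
--     return (len(counts) - 1) + sum((c - 1) * time[v - 1] for v, c in counts.items() if c > 1)
-- ===== Notes on version B (the rewrite author's own statement) =====
-- stated objective: alternative
-- what changed: Replaces A's order-dependent scan with a growing seen-set by a frequency table of arr[:n] aggregated per distinct value: answer = (distinct-1) + sum of (count-1)*time[v-1] over repeated values.
import Mathlib
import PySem

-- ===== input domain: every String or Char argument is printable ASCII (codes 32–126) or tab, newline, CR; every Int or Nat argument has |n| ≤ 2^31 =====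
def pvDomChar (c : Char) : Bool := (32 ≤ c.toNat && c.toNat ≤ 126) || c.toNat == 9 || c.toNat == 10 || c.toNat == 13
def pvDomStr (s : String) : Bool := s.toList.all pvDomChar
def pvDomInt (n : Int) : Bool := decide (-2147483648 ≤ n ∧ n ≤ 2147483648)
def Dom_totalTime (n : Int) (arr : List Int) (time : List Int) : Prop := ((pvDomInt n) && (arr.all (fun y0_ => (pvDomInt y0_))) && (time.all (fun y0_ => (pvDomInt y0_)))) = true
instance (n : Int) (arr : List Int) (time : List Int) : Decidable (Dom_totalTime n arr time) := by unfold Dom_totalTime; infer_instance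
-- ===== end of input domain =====

-- B replaces A's order-dependent seen-set scan by an order-independent frequency table of arr[:n]
-- aggregated per distinct value (alternative decomposition, same asymptotic cost).


-- ===== PORT A =====
-- Literal port of A: seen set seeded with arr[0], then for i in range(1, n) add time[arr[i]-1]
-- if arr[i] was seen, else add 1.  pyGetD is the total form of arr[0]/arr[i]/time[arr[i]-1];
-- Pre_totalTime guarantees every index A evaluates is in range (Python raises exactly outside Pre_).
def totalTime (n : Int) (arr : List Int) (time : List Int) : Int :=
  ((PySem.List.pyRange 1 n).foldl
    (fun (st : Int × PySem.Set Int) i =>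
      if st.2.contains (PySem.List.pyGetD arr i 0) then
        (st.1 + PySem.List.pyGetD time (PySem.List.pyGetD arr i 0 - 1) 0,
         st.2.add (PySem.List.pyGetD arr i 0))
      else (st.1 + 1, st.2.add (PySem.List.pyGetD arr i 0)))
    (0, PySem.Set.add PySem.Set.empty (PySem.List.pyGetD arr 0 0))).1

-- ===== PORT B =====
-- Literal port of B (Source B): build a count dict of arr[:n], then
-- (number of distinct values - 1) + sum of (count-1)*time[v-1] over values with count > 1.
def totalTime_alt (n : Int) (arr : List Int) (time : List Int) : Int :=
  if n ≤ 0 then 0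
  else
    let counts : PySem.Dict Int Int :=
      (PySem.List.slice arr none (some n)).foldl
        (fun d v => d.insert v (d.getD v 0 + 1)) PySem.Dict.empty
    ((PySem.Dict.size counts : Int) - 1) +
      counts.items.foldl
        (fun acc p => if 1 < p.2 then acc + (p.2 - 1) * PySem.List.pyGetD time (p.1 - 1) 0 else acc) 0

-- ===== PRECONDITION & SPEC =====
-- Pre_ is exactly the inputs on which A returns: arr nonempty (arr[0]); if 0 < n every index
-- 1..n-1 exists (n ≤ len(arr)); and time[v-1] is in range for every value v repeated in arr[:n]
-- (those are exactly the time-lookups A performs).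
def Pre_totalTime (n : Int) (arr : List Int) (time : List Int) : Prop :=
  arr ≠ [] ∧ (0 < n → n ≤ (arr.length : Int)) ∧
  ∀ v ∈ arr.take n.toNat, 1 < (arr.take n.toNat).count v →
    PySem.Raise.InRange time.length (v - 1)
instance (n : Int) (arr : List Int) (time : List Int) : Decidable (Pre_totalTime n arr time) := by
  unfold Pre_totalTime; infer_instance
def pvWitness_totalTime : Int × List Int × List Int := (3, [1, 2, 1], [5, 5])

def Spec_totalTime (n : Int) (arr : List Int) (time : List Int) (out : Int) : Prop := out = totalTime_alt n arr time
instance (n : Int) (arr : List Int) (time : List Int) (out : Int) : Decidable (Spec_totalTime n arr time out) := by unfold Spec_totalTime; infer_instance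

-- ===== CLAIM (what is proved, stated in full; the proofs are below) =====
def Claim_equal_totalTime : Prop := ∀ (n : Int) (arr : List Int) (time : List Int), Dom_totalTime n arr time → Pre_totalTime n arr time → Spec_totalTime n arr time (totalTime n arr time)

-- ===== LEMMAS AND PROOFS =====

def pvBval (t : Int → Int) (l : List Int) : Int :=
  ((PySem.Set.ofList l).length : Int) - 1 +
    ((PySem.Set.ofList l).map
      (fun k => if 1 < l.count k then ((l.count k : Int) - 1) * t k else 0)).sum

theorem pv_sum_map_single {y : Int} {ks : List Int} (hnd : ks.Nodup) (hy : y ∈ ks)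
    (f g : Int → Int) (h : ∀ k ∈ ks, k ≠ y → f k = g k) :
    (ks.map f).sum = (ks.map g).sum + (f y - g y) := by
  induction ks with
  | nil => cases hy
  | cons a ks ih =>
    rcases List.mem_cons.mp hy with rfl | hy'
    · have : ∀ k ∈ ks, f k = g k := by
        intro k hk
        exact h k (List.mem_cons_of_mem _ hk) (fun hky => (List.nodup_cons.mp hnd).1 (hky ▸ hk))
      simp [List.map_congr_left this]; ring
    · have ha : f a = g a :=
        h a List.mem_cons_self (fun hay => (List.nodup_cons.mp hnd).1 (hay ▸ hy'))
      have := ih (List.nodup_cons.mp hnd).2 hy' (fun k hk => h k (List.mem_cons_of_mem _ hk))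
      simp [ha, this]; ring

theorem pvBval_snoc (t : Int → Int) (l : List Int) (y : Int) :
    pvBval t (l ++ [y]) = if y ∈ l then pvBval t l + t y else pvBval t l + 1 := by
  have hcount : ∀ k : Int, (l ++ [y]).count k = l.count k + if y = k then 1 else 0 := by
    intro k
    rw [List.count_append]
    by_cases h : y = k
    · subst h; simp
    · simp [h]
  by_cases hy : y ∈ l
  · have hset : PySem.Set.ofList (l ++ [y]) = PySem.Set.ofList l := by
      rw [PySem.Set.ofList_append_singleton,
        PySem.Set.add_of_mem ((PySem.Set.mem_ofList _ _).mpr hy)]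
    have hc1 : 1 ≤ l.count y := List.count_pos_iff.mpr hy
    have hsum := pv_sum_map_single (PySem.Set.nodup_ofList l)
      ((PySem.Set.mem_ofList _ _).mpr hy)
      (fun k => if 1 < (l ++ [y]).count k then (((l ++ [y]).count k : Int) - 1) * t k else 0)
      (fun k => if 1 < l.count k then ((l.count k : Int) - 1) * t k else 0)
      (by intro k _ hk; simp only [hcount]; simp [Ne.symm hk])
    have hdiff :
        (if 1 < (l ++ [y]).count y then (((l ++ [y]).count y : Int) - 1) * t y else 0) -
        (if 1 < l.count y then ((l.count y : Int) - 1) * t y else 0) = t y := by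
      rw [hcount y, if_pos rfl]
      rcases Nat.lt_or_ge 1 (l.count y) with h1 | h1
      · rw [if_pos (by omega : 1 < l.count y + 1), if_pos h1]
        push_cast; ring
      · have hc : l.count y = 1 := by omega
        rw [hc]; norm_num
    rw [if_pos hy]
    simp only [pvBval, hset]
    beta_reduce at hsum
    rw [hsum, hdiff]
    ring
  · have hset : PySem.Set.ofList (l ++ [y]) = PySem.Set.ofList l ++ [y] := by
      rw [PySem.Set.ofList_append_singleton,
        PySem.Set.add_of_not_mem (fun h => hy ((PySem.Set.mem_ofList _ _).mp h))]
    have hmap : (PySem.Set.ofList l).map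
        (fun k => if 1 < (l ++ [y]).count k then (((l ++ [y]).count k : Int) - 1) * t k else 0)
        = (PySem.Set.ofList l).map
        (fun k => if 1 < l.count k then ((l.count k : Int) - 1) * t k else 0) := by
      apply List.map_congr_left
      intro k hk
      have hk' : k ≠ y := fun h => hy (h ▸ (PySem.Set.mem_ofList _ _).mp hk)
      rw [hcount k]; simp [Ne.symm hk']
    have hcy : (l ++ [y]).count y = 1 := by rw [hcount y]; simp [List.count_eq_zero_of_not_mem hy]
    rw [if_neg hy]
    simp only [pvBval, hset, List.map_append, List.map_cons, List.map_nil, List.sum_append,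
      List.length_append, hmap, hcy]
    norm_num; ring

theorem pv_loopA (t : Int → Int) (x : Int) (xs : List Int) :
    xs.foldl
      (fun (st : Int × PySem.Set Int) v =>
        if st.2.contains v then (st.1 + t v, st.2.add v) else (st.1 + 1, st.2.add v))
      (0, PySem.Set.ofList [x])
    = (pvBval t (x :: xs), PySem.Set.ofList (x :: xs)) := by
  induction xs using List.reverseRecOn with
  | nil =>
    have : pvBval t [x] = 0 := by
      have := pvBval_snoc t [] x
      simp [pvBval] at this ⊢
      omega
    simp [this]
  | append_singleton xs y ih =>
    rw [List.foldl_append, ih]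
    have hcons : x :: (xs ++ [y]) = (x :: xs) ++ [y] := by simp
    by_cases hy : y ∈ x :: xs
    · have hc : (PySem.Set.ofList (x :: xs)).contains y = true :=
        (PySem.Set.contains_iff _ _).mpr ((PySem.Set.mem_ofList _ _).mpr hy)
      simp only [List.foldl_cons, List.foldl_nil, hc, if_pos]
      rw [hcons, pvBval_snoc, if_pos hy, PySem.Set.ofList_append_singleton]
    · have hc : (PySem.Set.ofList (x :: xs)).contains y = false := by
        rw [Bool.eq_false_iff]
        intro h
        exact hy ((PySem.Set.mem_ofList _ _).mp ((PySem.Set.contains_iff _ _).mp h))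
      simp only [List.foldl_cons, List.foldl_nil, hc, Bool.false_eq_true, if_neg,
        not_false_eq_true]
      rw [hcons, pvBval_snoc, if_neg hy, PySem.Set.ofList_append_singleton]

theorem pv_B_eq_Bval (t : Int → Int) (l : List Int) :
    ((PySem.Dict.size (PySem.Dict.counter l) : Int) - 1) +
      (PySem.Dict.counter l).items.foldl
        (fun acc p => if 1 < p.2 then acc + (p.2 - 1) * t p.1 else acc) 0
    = pvBval t l := by
  have hfun : (fun (acc : Int) (p : Int × Int) => if 1 < p.2 then acc + (p.2 - 1) * t p.1 else acc)
      = fun acc p => acc + if 1 < p.2 then (p.2 - 1) * t p.1 else 0 := by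
    funext acc p; split <;> simp
  have hsize : PySem.Dict.size (PySem.Dict.counter l) = (PySem.Set.ofList l).length := by
    simp [PySem.Dict.size, PySem.Dict.items_counter]
  rw [hfun, PySem.List.foldl_add, PySem.Dict.items_counter, List.map_map, hsize]
  simp only [pvBval]
  have hmc : ∀ k ∈ PySem.Set.ofList l,
      ((fun (p : Int × Int) => if 1 < p.2 then (p.2 - 1) * t p.1 else 0) ∘
        fun k => (k, (l.count k : Int))) k
      = (fun k => if 1 < l.count k then ((l.count k : Int) - 1) * t k else 0) k := by
    intro k _; simp [Nat.one_lt_cast]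
  rw [List.map_congr_left hmc]
  ring

theorem pv_pyGetD_take (xs : List Int) (m : Nat) (i : Int) (d : Int)
    (h0 : 0 ≤ i) (hm : i.toNat < m) :
    PySem.List.pyGetD (xs.take m) i d = PySem.List.pyGetD xs i d := by
  obtain ⟨k, rfl⟩ : ∃ k : Nat, i = (k : Int) := ⟨i.toNat, (Int.toNat_of_nonneg h0).symm⟩
  rw [PySem.List.pyGetD_natCast, PySem.List.pyGetD_natCast]
  simp at hm
  simp [List.getD, hm]

-- The count dict B builds is Counter(arr[:n]) (modify k 0 (+1) is insert k (getD k 0 + 1)).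
theorem pv_counts_eq (l : List Int) :
    l.foldl (fun d v => d.insert v (d.getD v 0 + 1)) PySem.Dict.empty = PySem.Dict.counter l := by
  rfl

-- ===== VERDICT (by name: the statement is the Claim_ definition above) =====
theorem totalTime_spec : Claim_equal_totalTime := by
  intro n arr time _ hpre
  obtain ⟨hne, hlen, -⟩ := hpre
  unfold Spec_totalTime
  by_cases hn : n ≤ 0
  · simp only [totalTime, totalTime_alt, if_pos hn,
      PySem.List.pyRange_one_eq_nil (by omega : n ≤ 1), List.foldl_nil]
  · have hn' : 0 < n := by omega
    have hlen' : n ≤ ((arr.length : Nat) : Int) := hlen hn'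
    obtain ⟨a, rest, rfl⟩ : ∃ a rest, arr = a :: rest := by
      cases arr with
      | nil => exact absurd rfl hne
      | cons a rest => exact ⟨a, rest, rfl⟩
    have hA : totalTime n (a :: rest) time =
        pvBval (fun v => PySem.List.pyGetD time (v - 1) 0) ((a :: rest).take n.toNat) := by
      unfold totalTime
      have ha0 : PySem.List.pyGetD (a :: rest) 0 0 = a := by
        rw [show (0 : Int) = ((0 : Nat) : Int) from rfl, PySem.List.pyGetD_natCast]
        rfl
      have hs0 : PySem.Set.add PySem.Set.empty a = PySem.Set.ofList [a] := rfl
      rw [ha0, hs0]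
      rw [PySem.List.foldl_congr_mem (PySem.List.pyRange 1 n) _
        (fun (st : Int × PySem.Set Int) i =>
          (fun (st : Int × PySem.Set Int) v =>
            if st.2.contains v then
              (st.1 + PySem.List.pyGetD time (v - 1) 0, st.2.add v)
            else (st.1 + 1, st.2.add v)) st
            (PySem.List.pyGetD ((a :: rest).take n.toNat) i 0))
        (0, PySem.Set.ofList [a])
        (by
          intro acc i hi
          obtain ⟨h1, h2⟩ := PySem.List.mem_pyRange_one.mp hi
          simp only [pv_pyGetD_take (a :: rest) n.toNat i 0 (by omega) (by omega)])]
      have hL : (a :: rest).length = rest.length + 1 := List.length_cons ..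
      rw [hL] at hlen'
      have hll : ((a :: rest).take n.toNat).length = n.toNat := by
        rw [List.length_take, hL]
        omega
      have hrange : PySem.List.pyRange 1 n
          = PySem.List.pyRange 1 (PySem.List.len ((a :: rest).take n.toNat)) := by
        simp only [PySem.List.len_eq, hll]
        congr 1
        omega
      rw [hrange, PySem.List.foldl_pyRange_pyGetD ((a :: rest).take n.toNat) 0
        (fun (st : Int × PySem.Set Int) v =>
          if st.2.contains v then
            (st.1 + PySem.List.pyGetD time (v - 1) 0, st.2.add v)
          else (st.1 + 1, st.2.add v))
        (0, PySem.Set.ofList [a]) (by norm_num : (0 : Int) ≤ 1)]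
      have htake : (a :: rest).take n.toNat = a :: rest.take (n.toNat - 1) := by
        have hm : n.toNat = (n.toNat - 1) + 1 := by omega
        rw [hm, List.take_succ_cons]
        simp
      rw [htake]
      simp only [Int.toNat_one, List.drop_succ_cons, List.drop_zero]
      exact congrArg Prod.fst
        (pv_loopA (fun v => PySem.List.pyGetD time (v - 1) 0) a (rest.take (n.toNat - 1)))
    have hB : totalTime_alt n (a :: rest) time =
        pvBval (fun v => PySem.List.pyGetD time (v - 1) 0) ((a :: rest).take n.toNat) := by
      show (if n ≤ 0 then 0 else _) = _
      rw [if_neg hn]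
      show ((PySem.Dict.size ((PySem.List.slice (a :: rest) none (some n)).foldl
          (fun d v => d.insert v (d.getD v 0 + 1)) PySem.Dict.empty) : Int) - 1) + _ = _
      rw [PySem.List.slice_to _ (le_of_lt hn'), pv_counts_eq]
      exact pv_B_eq_Bval (fun v => PySem.List.pyGetD time (v - 1) 0) ((a :: rest).take n.toNat)
    rw [hA, hB]
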